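-- pv_equiv track=rewrite | github.com/jeonseongjae98/algorithm | 프로그래머스/2/12981. 영어 끝말잇기/영어 끝말잇기.py | solution
-- ===== SOURCE A (Python) =====
-- def solution(n, words):
--     used = set()
--
--
--     for i in range(len(words)):
--         if words[i] in used:
--             return [(i%n)+1, (i//n)+1]
--
--         if i>0 and words[i-1][-1] != words[i][0]:
--             return [(i%n)+1, (i//n)+1]
--
--         used.add(words[i])
--
--     return [0,0]
-- ===== SOURCE B (Python) =====
-- def solution(n, words):
--     L = len(words)
--     # pass 1: index of the first word already used earlier (default L)
--     first_dup = L
--     seen = set()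
--     for i, w in enumerate(words):
--         if w in seen:
--             first_dup = i
--             break
--         seen.add(w)
--     # pass 2: first chain-break index; only indices before first_dup can matter
--     err = first_dup
--     for i in range(1, first_dup):
--         if words[i - 1][-1] != words[i][0]:
--             err = i
--             break
--     if err == L:
--         return [0, 0]
--     return [err % n + 1, err // n + 1]
-- ===== Notes on version B (the rewrite author's own statement) =====
-- stated objective: alternative
-- what changed: A's single fused loop with early returns is replaced by two independent scans (first-duplicate index, then first chain-break index before it) combined into one final formula.
import Mathlib
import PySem

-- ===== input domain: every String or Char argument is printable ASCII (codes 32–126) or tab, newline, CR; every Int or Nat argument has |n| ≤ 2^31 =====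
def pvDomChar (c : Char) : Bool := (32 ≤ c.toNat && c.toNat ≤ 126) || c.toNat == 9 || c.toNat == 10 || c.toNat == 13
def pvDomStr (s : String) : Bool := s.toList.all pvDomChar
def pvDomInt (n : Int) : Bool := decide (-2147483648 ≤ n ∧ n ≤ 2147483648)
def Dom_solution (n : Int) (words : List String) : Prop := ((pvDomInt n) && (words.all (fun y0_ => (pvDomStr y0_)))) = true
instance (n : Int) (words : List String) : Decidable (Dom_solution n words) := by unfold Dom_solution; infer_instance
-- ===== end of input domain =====

-- B replaces A's single fused loop (early returns) by two scans — first-duplicate index, then first chain-break before it — combined into one final formula; alternative decomposition, same cost.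


-- ===== PORT A =====
-- [(i%n)+1, (i//n)+1] — the return value both Pythons build at a failing index i
def pvOut (n : Int) (i : Nat) : List Int :=
  [PySem.Int.mod (i : Int) n + 1, PySem.Int.floordiv (i : Int) n + 1]

-- A's for-loop over range(len(words)): structural recursion over the suffix,
-- carrying the index i, the previous word words[i-1] (none iff i = 0, the
-- 'i>0 and' guard) and the 'used' set.  words[i-1][-1] / words[i][0] are
-- PySem.Str.pyGet? (none = IndexError on an empty word, excluded by Pre_).
def solutionGo (n : Int) (prev : Option String) (used : PySem.Set String) (i : Nat) :
    List String → List Int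
  | [] => [0, 0]
  | w :: rest =>
    if PySem.Set.contains used w then pvOut n i
    else
      match prev with
      | some p =>
        if PySem.Str.pyGet? p (-1) ≠ PySem.Str.pyGet? w 0 then pvOut n i
        else solutionGo n (some w) (PySem.Set.add used w) (i + 1) rest
      | none => solutionGo n (some w) (PySem.Set.add used w) (i + 1) rest

def solution (n : Int) (words : List String) : List Int :=
  solutionGo n none PySem.Set.empty 0 words

-- ===== PORT B =====
-- pass 1 of Source B: index of the first word already in 'seen' (default = len(words))
def firstDup (seen : PySem.Set String) (i : Nat) : List String → Nat
  | [] => i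
  | w :: rest =>
    if PySem.Set.contains seen w then i else firstDup (PySem.Set.add seen w) (i + 1) rest

-- pass 2 of Source B: 'for i in range(1, first_dup)' looking for the first chain break,
-- defaulting to bound = first_dup; prev carries words[i-1]
def firstBreakUpto (bound : Nat) (prev : String) (i : Nat) : List String → Nat
  | [] => bound
  | w :: rest =>
    if i < bound then
      if PySem.Str.pyGet? prev (-1) ≠ PySem.Str.pyGet? w 0 then i
      else firstBreakUpto bound w (i + 1) rest
    else bound

def solution_alt (n : Int) (words : List String) : List Int :=
  let L := words.length
  let fd := firstDup PySem.Set.empty 0 words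
  let err := match words with
             | [] => fd
             | w :: rest => firstBreakUpto fd w 1 rest
  if err = L then [0, 0] else pvOut n err

-- ===== PRECONDITION & SPEC =====
-- the break check at index j (j ≥ 1) reads a duplicate / touches an empty word / mismatches:
def pvDupAt (words : List String) (j : Nat) : Prop := words.getD j "" ∈ words.take j
def pvPairOkAt (words : List String) (j : Nat) : Prop :=
  words.getD (j - 1) "" ≠ "" ∧ words.getD j "" ≠ ""
def pvMismAt (words : List String) (j : Nat) : Prop :=
  PySem.Str.pyGet? (words.getD (j - 1) "") (-1) ≠ PySem.Str.pyGet? (words.getD j "") 0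
-- Pre_ is exactly 'A returns normally': it excludes (a) the IndexError — the scan reaches
-- the break check at some i (no duplicate up to i, every earlier break check well-defined
-- and passing) whose pair touches an empty word — and (b) the ZeroDivisionError — n = 0
-- while some index fails by duplicate or by a well-defined chain break.
def Pre_solution (n : Int) (words : List String) : Prop :=
  (¬ ∃ i < words.length, 1 ≤ i ∧ ¬ pvPairOkAt words i ∧ (∀ j ≤ i, ¬ pvDupAt words j) ∧
      (∀ j < i, 1 ≤ j → pvPairOkAt words j ∧ ¬ pvMismAt words j)) ∧
  (n = 0 → ¬ ∃ i < words.length, pvDupAt words i ∨ (1 ≤ i ∧ pvPairOkAt words i ∧ pvMismAt words i))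
instance (n : Int) (words : List String) : Decidable (Pre_solution n words) := by
  unfold Pre_solution pvDupAt pvPairOkAt pvMismAt; infer_instance

def pvWitness_solution : Int × List String := (2, ["ab", "ba", "ab"])

def Spec_solution (n : Int) (words : List String) (out : List Int) : Prop := out = solution_alt n words
instance (n : Int) (words : List String) (out : List Int) : Decidable (Spec_solution n words out) := by unfold Spec_solution; infer_instance

-- ===== CLAIM (what is proved, stated in full; the proofs are below) =====
def Claim_equal_solution : Prop := ∀ (n : Int) (words : List String), Dom_solution n words → Pre_solution n words → Spec_solution n words (solution n words)

-- ===== LEMMAS AND PROOFS =====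

-- proof-side helper: Source B's pass 2 without its bound (scan all consecutive pairs)
def firstBreakAux (prev : String) (i : Nat) : List String → Nat
  | [] => i
  | w :: rest =>
    if PySem.Str.pyGet? prev (-1) ≠ PySem.Str.pyGet? w 0 then i else firstBreakAux w (i + 1) rest

theorem firstDup_ge (l : List String) : ∀ seen i, i ≤ firstDup seen i l := by
  induction l with
  | nil => intro seen i; simp [firstDup]
  | cons w rest ih =>
    intro seen i
    simp only [firstDup]
    split
    · exact le_refl i
    · exact le_trans (Nat.le_succ i) (ih _ (i + 1))

theorem firstDup_le (l : List String) : ∀ seen i, firstDup seen i l ≤ i + l.length := by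
  induction l with
  | nil => intro seen i; simp [firstDup]
  | cons w rest ih =>
    intro seen i
    simp only [firstDup, List.length_cons]
    split
    · omega
    · have := ih (PySem.Set.add seen w) (i + 1); omega

theorem firstBreakAux_ge (l : List String) : ∀ p i, i ≤ firstBreakAux p i l := by
  induction l with
  | nil => intro p i; simp [firstBreakAux]
  | cons w rest ih =>
    intro p i
    simp only [firstBreakAux]
    split
    · exact le_refl i
    · exact le_trans (Nat.le_succ i) (ih _ (i + 1))

-- the bounded pass 2 is the minimum of its bound and the unbounded scan
theorem firstBreakUpto_eq_min (l : List String) :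
    ∀ (p : String) (i b : Nat), b ≤ i + l.length →
      firstBreakUpto b p i l = min b (firstBreakAux p i l) := by
  induction l with
  | nil =>
    intro p i b hb
    simp only [List.length_nil, Nat.add_zero] at hb
    simp [firstBreakUpto, firstBreakAux, Nat.min_eq_left hb]
  | cons w rest ih =>
    intro p i b hb
    simp only [firstBreakUpto, firstBreakAux, PySem.Str.pyGet?]
    by_cases hib : i < b
    · rw [if_pos hib]
      by_cases hm : PySem.Chars.pyGet? p.toList (-1) = PySem.Chars.pyGet? w.toList 0
      · simp only [hm, ne_eq, not_true_eq_false, if_false]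
        exact ih w (i + 1) b (by simp only [List.length_cons] at hb; omega)
      · simp only [ne_eq, hm, not_false_eq_true, if_true]
        omega
    · rw [if_neg hib]
      have h3 : i + 1 ≤ firstBreakAux w (i + 1) rest := firstBreakAux_ge _ _ _
      split
      · omega
      · omega

-- main invariant: on a suffix with a real previous word, A's fused loop equals
-- the minimum of the first-duplicate and first-break scans, finished by B's final test.
theorem solutionGo_eq (n : Int) (rest : List String) :
    ∀ (p : String) (used : PySem.Set String) (i : Nat),
      solutionGo n (some p) used i rest =
        (if min (firstDup used i rest) (firstBreakAux p i rest) = i + rest.length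
         then [0, 0]
         else pvOut n (min (firstDup used i rest) (firstBreakAux p i rest))) := by
  induction rest with
  | nil =>
    intro p used i
    simp [solutionGo, firstDup, firstBreakAux]
  | cons w rest ih =>
    intro p used i
    by_cases hc : w ∈ used
    · have hfd : firstDup used i (w :: rest) = i := by simp [firstDup, hc]
      have hfb : i ≤ firstBreakAux p i (w :: rest) := firstBreakAux_ge _ _ _
      have hmin : min (firstDup used i (w :: rest)) (firstBreakAux p i (w :: rest)) = i := by
        rw [hfd]; exact Nat.min_eq_left hfb
      rw [hmin]
      have hne : i ≠ i + (w :: rest).length := by simp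
      rw [if_neg hne]
      simp [solutionGo, hc]
    · by_cases hm : PySem.List.pyGet? p.toList (-1) = PySem.List.pyGet? w.toList 0
      · have hfd' : firstDup used i (w :: rest) = firstDup (PySem.Set.add used w) (i + 1) rest := by
          simp [firstDup, hc]
        have hfb' : firstBreakAux p i (w :: rest) = firstBreakAux w (i + 1) rest := by
          simp [firstBreakAux, PySem.Str.pyGet?, hm]
        have hL : i + (w :: rest).length = (i + 1) + rest.length := by simp; omega
        rw [hfd', hfb', hL]
        have hgo : solutionGo n (some p) used i (w :: rest)
            = solutionGo n (some w) (PySem.Set.add used w) (i + 1) rest := by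
          simp [solutionGo, hc, PySem.Str.pyGet?, hm]
        rw [hgo, ih]
      · have hfb : firstBreakAux p i (w :: rest) = i := by
          simp [firstBreakAux, PySem.Str.pyGet?, hm]
        have hfd : i + 1 ≤ firstDup (PySem.Set.add used w) (i + 1) rest := firstDup_ge _ _ _
        have hfd' : firstDup used i (w :: rest) = firstDup (PySem.Set.add used w) (i + 1) rest := by
          simp [firstDup, hc]
        have hmin : min (firstDup used i (w :: rest)) (firstBreakAux p i (w :: rest)) = i := by
          rw [hfb, hfd']
          exact Nat.min_eq_right (by omega)
        rw [hmin]
        have hne : i ≠ i + (w :: rest).length := by simp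
        rw [if_neg hne]
        simp [solutionGo, hc, PySem.Str.pyGet?, hm]

-- ===== VERDICT (by name: the statement is the Claim_ definition above) =====
theorem solution_spec : Claim_equal_solution := by
  intro n words _ _
  unfold Spec_solution solution solution_alt
  cases words with
  | nil => simp [solutionGo, firstDup]
  | cons w rest =>
    have hfd : firstDup PySem.Set.empty 0 (w :: rest)
        = firstDup (PySem.Set.add PySem.Set.empty w) 1 rest := by
      simp [firstDup]
    have hgo : solutionGo n none PySem.Set.empty 0 (w :: rest)
        = solutionGo n (some w) (PySem.Set.add PySem.Set.empty w) 1 rest := by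
      simp [solutionGo]
    have hle : firstDup (PySem.Set.add PySem.Set.empty w) 1 rest ≤ 1 + rest.length :=
      firstDup_le _ _ _
    simp only [hgo, hfd, solutionGo_eq, List.length_cons,
      firstBreakUpto_eq_min rest w 1 _ hle]
    have : 1 + rest.length = rest.length + 1 := by omega
    rw [this]
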